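-- pv_equiv track=rewrite | github.com/EdsonEddy/scsc | notebooks/datasets/large/773086.py | calcular_sucesion
-- ===== SOURCE A (Python) =====
-- def calcular_sucesion(n):
--     resultado = []
--     a = 1
--     for i in range(1, n + 1):
--         suma_anterior = sum(resultado) if resultado else 0
--         suma_actual = sum(range(a, a + 2 * i - 1))
--         cubo = (i ** 3)
--         resultado.append(cubo)
--         a += 2 * i - 1
--     return f"{resultado[-2]}+{resultado[-1]}" if len(resultado) > 1 else f"{resultado[0]}"
-- ===== SOURCE B (Python) =====
-- def calcular_sucesion(n):
--     if n > 1: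
--         return f"{(n - 1) ** 3}+{n ** 3}"
--     return "1"
-- ===== Notes on version B (the rewrite author's own statement) =====
-- stated objective: faster
-- what changed: B replaces the O(n) loop (with its dead quadratic sum computations) by the closed form (n-1)^3 and n^3, since resultado is just the cubes of 1..n.
import Mathlib
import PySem

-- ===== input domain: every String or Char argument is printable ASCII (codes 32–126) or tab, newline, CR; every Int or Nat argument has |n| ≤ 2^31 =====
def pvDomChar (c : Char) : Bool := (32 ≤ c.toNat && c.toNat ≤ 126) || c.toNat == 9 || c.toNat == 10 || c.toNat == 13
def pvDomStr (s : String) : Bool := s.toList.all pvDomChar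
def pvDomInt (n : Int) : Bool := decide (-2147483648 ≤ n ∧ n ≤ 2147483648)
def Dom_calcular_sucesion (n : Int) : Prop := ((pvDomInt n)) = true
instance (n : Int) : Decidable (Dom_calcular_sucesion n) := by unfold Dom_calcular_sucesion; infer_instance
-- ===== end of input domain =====

-- B replaces A's O(n) loop (whose per-iteration sums are dead code) by the closed form (n-1)^3 and n^3.

-- ===== PORT A =====
-- loop body: state = (resultado, a); suma_anterior / suma_actual are computed (and unused), as in A
def calcAStep (st : List Int × Int) (i : Int) : List Int × Int :=
  let resultado := st.1
  let a := st.2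
  let _suma_anterior : Int := if resultado ≠ [] then resultado.sum else 0
  let _suma_actual : Int := (PySem.List.pyRange a (a + 2 * i - 1) 1).sum
  let cubo := i ^ 3
  (resultado ++ [cubo], a + (2 * i - 1))

def calcular_sucesion (n : Int) : String :=
  let st := (PySem.List.pyRange 1 (n + 1) 1).foldl calcAStep ([], 1)
  let resultado := st.1
  if resultado.length > 1 then
    PySem.Int.toStr ((PySem.List.pyGet? resultado (-2)).getD 0) ++ "+" ++
      PySem.Int.toStr ((PySem.List.pyGet? resultado (-1)).getD 0)
  else
    PySem.Int.toStr ((PySem.List.pyGet? resultado 0).getD 0)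

-- ===== PORT B =====
def calcular_sucesion_alt (n : Int) : String :=
  if n > 1 then
    PySem.Int.toStr ((n - 1) ^ 3) ++ "+" ++ PySem.Int.toStr (n ^ 3)
  else
    "1"

-- ===== PRECONDITION & SPEC =====
-- A raises IndexError for n ≤ 0 (resultado is empty); Pre_ excludes exactly those inputs.
def Pre_calcular_sucesion (n : Int) : Prop := 1 ≤ n
instance (n : Int) : Decidable (Pre_calcular_sucesion n) := by unfold Pre_calcular_sucesion; infer_instance
def pvWitness_calcular_sucesion : Int := 3

def Spec_calcular_sucesion (n : Int) (out : String) : Prop := out = calcular_sucesion_alt n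
instance (n : Int) (out : String) : Decidable (Spec_calcular_sucesion n out) := by unfold Spec_calcular_sucesion; infer_instance

-- ===== CLAIM (what is proved, stated in full; the proofs are below) =====
def Claim_equal_calcular_sucesion : Prop := ∀ (n : Int), Dom_calcular_sucesion n → Pre_calcular_sucesion n → Spec_calcular_sucesion n (calcular_sucesion n)

-- ===== LEMMAS AND PROOFS =====

-- the first component of A's loop state is just the cubes appended so far
lemma calcA_fold_fst (l : List Int) (acc : List Int) (a : Int) :
    (l.foldl calcAStep (acc, a)).1 = acc ++ l.map (fun i => i ^ 3) := by
  induction l generalizing acc a with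
  | nil => simp
  | cons x xs ih => simp [calcAStep, ih]

lemma resultado_eq (n : Int) :
    ((PySem.List.pyRange 1 (n + 1) 1).foldl calcAStep ([], 1)).1
      = (PySem.List.pyRange 1 (n + 1) 1).map (fun i => i ^ 3) := by
  simpa using calcA_fold_fst (PySem.List.pyRange 1 (n + 1) 1) [] 1

-- ===== VERDICT (by name: the statement is the Claim_ definition above) =====

theorem calcular_sucesion_spec : Claim_equal_calcular_sucesion := by
  intro n _ hn
  have hn' : 1 ≤ n := hn
  unfold Spec_calcular_sucesion calcular_sucesion calcular_sucesion_alt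
  simp only [resultado_eq]
  by_cases h2 : n ≥ 2
  · -- split the range as pyRange 1 (n-1) ++ [n-1] ++ [n]
    have e1 : PySem.List.pyRange 1 (n + 1) 1
        = (PySem.List.pyRange 1 (n - 1) 1 ++ [n - 1]) ++ [n] := by
      rw [show n + 1 = n + 1 from rfl,
          PySem.List.pyRange_one_succ_right (by omega : (1:Int) ≤ n),
          show n = (n - 1) + 1 by ring,
          PySem.List.pyRange_one_succ_right (by omega : (1:Int) ≤ n - 1)]
      simp
    rw [e1]
    have hlen : ((PySem.List.pyRange 1 (n - 1) 1).map (fun i => i ^ 3)).length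
        = (n - 2).toNat := by
      simp [PySem.List.length_pyRange_one]
      omega
    simp only [List.map_append, List.map_cons, List.map_nil]
    have hL : (((PySem.List.pyRange 1 (n-1) 1).map (fun i => i ^ 3) ++ [(n-1) ^ 3]) ++ [n ^ 3]).length > 1 := by
      simp
    rw [if_pos hL, if_pos (by omega : n > 1)]
    have hget1 : PySem.List.pyGet? (((PySem.List.pyRange 1 (n-1) 1).map (fun i => i ^ 3) ++ [(n-1) ^ 3]) ++ [n ^ 3]) (-1) = some (n ^ 3) :=
      PySem.List.pyGet?_neg_one_append_singleton _ _
    have hget2 : PySem.List.pyGet? (((PySem.List.pyRange 1 (n-1) 1).map (fun i => i ^ 3) ++ [(n-1) ^ 3]) ++ [n ^ 3]) (-2) = some ((n-1) ^ 3) := by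
      rw [List.append_assoc]
      have hidx : ((PySem.List.pyRange 1 (n-1) 1).map (fun i => i ^ 3)).length
          = (((PySem.List.pyRange 1 (n-1) 1).map (fun i => i ^ 3)) ++ ([(n-1)^3] ++ [n^3])).length - 2 := by
        simp
      have hle : 2 ≤ (((PySem.List.pyRange 1 (n-1) 1).map (fun i => i ^ 3)) ++ ([(n-1)^3] ++ [n^3])).length := by
        simp
      rw [PySem.List.pyGet?_neg_ofNat _ 2 (by omega) hle]
      rw [← hidx]
      simp
    rw [hget1, hget2]
    rfl
  · -- n = 1
    have hn1 : n = 1 := by omega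
    subst hn1
    decide
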